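-- pv_equiv track=rewrite | github.com/pypi-data/pypi-mirror-191 | packages/UnicodeTokenizer/UnicodeTokenizer-0.1.7.tar.gz/UnicodeTokenizer-0.1.7/UnicodeTokenizer.py | split_marks
-- ===== SOURCE A (Python) =====
-- def split_marks(line,marks):
--     tokens = []
--     for i, x in enumerate(line):
--         if i == 0:
--             tokens.append(x)
--         elif marks[i] or marks[i-1]:
--             tokens.append(x)
--         else:
--             tokens[-1] += x
--     return tokens
-- ===== SOURCE B (Python) =====
-- def split_marks(line, marks):
--     n = len(line)
--     if n == 0:
--         return []
--     bounds = [0] + [i for i in range(1, n) if marks[i] or marks[i - 1]] + [n]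
--     return [line[a:b] for a, b in zip(bounds, bounds[1:])]
-- ===== Notes on version B (the rewrite author's own statement) =====
-- stated objective: alternative
-- what changed: B replaces A's single accumulate loop (append a char or extend the last token in place) by two phases: collect the token start indices (0 plus every i>=1 with marks[i] or marks[i-1]), then emit each token as the slice line[a:b] between consecutive boundaries.
import Mathlib
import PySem

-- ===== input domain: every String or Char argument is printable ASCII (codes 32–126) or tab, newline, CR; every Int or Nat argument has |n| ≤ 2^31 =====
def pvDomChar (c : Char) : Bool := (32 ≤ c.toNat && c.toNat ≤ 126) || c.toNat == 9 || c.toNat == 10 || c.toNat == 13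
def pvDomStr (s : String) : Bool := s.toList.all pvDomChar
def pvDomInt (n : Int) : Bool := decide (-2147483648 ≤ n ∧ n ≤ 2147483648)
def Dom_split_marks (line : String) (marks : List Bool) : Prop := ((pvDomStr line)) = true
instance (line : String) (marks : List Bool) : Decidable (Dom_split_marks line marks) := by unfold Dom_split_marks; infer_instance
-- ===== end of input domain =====

-- B replaces A's accumulate-and-append loop by two phases (collect token start indices, then emit slices); equal return values, no speed claim.


-- ===== PORT A =====
-- marks[i] is ported as pyGetD (default false): under Pre_ every access is in range
-- (Python raises IndexError exactly on the inputs Pre_ excludes).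
def aStep (marks : List Bool) (tokens : List String) (ix : Int × Char) : List String :=
  if ix.1 = 0 then tokens ++ [String.ofList [ix.2]]
  else if PySem.List.pyGetD marks ix.1 false || PySem.List.pyGetD marks (ix.1 - 1) false then
    tokens ++ [String.ofList [ix.2]]
  else tokens.dropLast ++ [tokens.getLast!.push ix.2]

def split_marks (line : String) (marks : List Bool) : List String :=
  (PySem.List.enumerate line.toList).foldl (aStep marks) []

-- ===== PORT B =====
def bBound (marks : List Bool) (i : Int) : Bool :=
  PySem.List.pyGetD marks i false || PySem.List.pyGetD marks (i - 1) false

-- B's body over the character list of `line` (slices are exact Python slices via PySem.List.slice).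
def altList (marks : List Bool) (cs : List Char) : List String :=
  let n : Int := cs.length
  if n = 0 then []
  else
    let bounds : List Int := (0 :: (PySem.List.pyRange 1 n).filter (bBound marks)) ++ [n]
    (bounds.zip bounds.tail).map (fun p => String.ofList (PySem.List.slice cs (some p.1) (some p.2)))

def split_marks_alt (line : String) (marks : List Bool) : List String :=
  altList marks line.toList

-- ===== PRECONDITION & SPEC =====
-- Pre_ excludes exactly the inputs on which Python A raises IndexError:
-- a line of length ≥ 2 with marks shorter than line (A reads marks[1..len(line)-1]).
def Pre_split_marks (line : String) (marks : List Bool) : Prop :=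
  line.toList.length ≤ 1 ∨ line.toList.length ≤ marks.length

instance (line : String) (marks : List Bool) : Decidable (Pre_split_marks line marks) := by
  unfold Pre_split_marks; infer_instance

def pvWitness_split_marks : String × List Bool := ("ab", [false, true])

def Spec_split_marks (line : String) (marks : List Bool) (out : List String) : Prop :=
  out = split_marks_alt line marks

instance (line : String) (marks : List Bool) (out : List String) : Decidable (Spec_split_marks line marks out) := by
  unfold Spec_split_marks; infer_instance

-- ===== CLAIM (what is proved, stated in full; the proofs are below) =====
def Claim_equal_split_marks : Prop := ∀ (line : String) (marks : List Bool), Dom_split_marks line marks → Pre_split_marks line marks → Spec_split_marks line marks (split_marks line marks)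

-- ===== LEMMAS AND PROOFS =====

lemma getLast!_concat' (l : List String) (e : String) : (l ++ [e]).getLast! = e := by
  induction l with
  | nil => rfl
  | cons a t ih =>
    cases t with
    | nil => rfl
    | cons b t' => simpa using ih

lemma zip_tail_concat : ∀ (l : List Int) (h : l ≠ []) (a : Int),
    (l ++ [a]).zip ((l ++ [a]).tail) = l.zip l.tail ++ [(l.getLast h, a)]
  | [x], _, a => by simp
  | x :: y :: t, _, a => by
    have ih := zip_tail_concat (y :: t) (by simp) a
    simp only [List.cons_append, List.tail_cons, List.zip_cons_cons] at ih ⊢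
    rw [ih]
    simp [List.getLast]

lemma mem_zip_tail {l : List Int} {p : Int × Int} (h : p ∈ l.zip l.tail) : p.1 ∈ l ∧ p.2 ∈ l := by
  obtain ⟨h1, h2⟩ := List.of_mem_zip h
  exact ⟨h1, List.mem_of_mem_tail h2⟩

lemma slice_stable (ds : List Char) (x : Char) {a b : Int} (h0 : 0 ≤ a) (h1 : 0 ≤ b)
    (ha : a ≤ (ds.length : Int)) (hb : b ≤ (ds.length : Int)) :
    PySem.List.slice (ds ++ [x]) (some a) (some b) = PySem.List.slice ds (some a) (some b) := by
  rw [PySem.List.slice_toNat _ h0 h1, PySem.List.slice_toNat _ h0 h1]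
  have ha' : a.toNat ≤ ds.length := by omega
  have hb' : b.toNat ≤ ds.length := by omega
  rw [List.drop_append_of_le_length ha', List.take_append_of_le_length (by simp; omega)]

lemma slice_grow (ds : List Char) (x : Char) {a : Int} (h0 : 0 ≤ a) (ha : a ≤ (ds.length : Int)) :
    PySem.List.slice (ds ++ [x]) (some a) (some ((ds.length : Int) + 1)) =
      PySem.List.slice ds (some a) (some (ds.length : Int)) ++ [x] := by
  rw [PySem.List.slice_toNat _ h0 (by omega), PySem.List.slice_toNat _ h0 (by omega)]
  have ha' : a.toNat ≤ ds.length := by omega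
  rw [List.drop_append_of_le_length ha']
  have hl : (List.drop a.toNat ds).length = ds.length - a.toNat := by simp
  have h1 : (((ds.length : Int) + 1).toNat - a.toNat) = (ds.length - a.toNat) + 1 := by omega
  have h2 : ((ds.length : Int).toNat - a.toNat) = ds.length - a.toNat := by omega
  rw [h2, h1, List.take_of_length_le (by simp), List.take_of_length_le (by simp [hl])]

lemma main_lemma (marks : List Bool) (cs : List Char) :
    (PySem.List.enumerate cs).foldl (aStep marks) [] = altList marks cs := by
  induction cs using List.reverseRecOn with
  | nil => simp [PySem.List.enumerate, altList]
  | append_singleton ds x ih =>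
    rw [PySem.List.enumerate_append, List.foldl_append, ih]
    have hstep : PySem.List.enumerate [x] (0 + (ds.length : Int)) = [((ds.length : Int), x)] := by
      simp [PySem.List.enumerate]
    rw [hstep]
    simp only [List.foldl_cons, List.foldl_nil]
    rcases eq_or_ne ds [] with rfl | hne
    · -- first character: A opens the first token, B emits the single slice [0,1)
      simp [aStep, altList, PySem.List.pyRange_one_eq_nil le_rfl,
        PySem.List.slice_toNat ([x]) (le_refl (0:Int)) (by norm_num : (0:Int) ≤ 1)]
    · have hm1 : 1 ≤ (ds.length : Int) := by
        have : ds.length ≠ 0 := by simpa using hne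
        omega
      set m : Int := (ds.length : Int) with hm
      set F : List Int := (PySem.List.pyRange 1 m).filter (bBound marks) with hF
      have hmemF : ∀ y ∈ (0 : Int) :: F, 0 ≤ y ∧ y ≤ m := by
        intro y hy
        rcases List.mem_cons.1 hy with rfl | h
        · omega
        · have := PySem.List.mem_pyRange_one.1 (List.mem_of_mem_filter h)
          omega
      have hrange : PySem.List.pyRange 1 (m + 1) = PySem.List.pyRange 1 m ++ [m] :=
        PySem.List.pyRange_one_succ_right hm1
      have hlen' : (((ds ++ [x]).length : Nat) : Int) = m + 1 := by simp [hm]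
      have halt : altList marks ds =
          (((0 :: F) ++ [m]).zip (((0 :: F) ++ [m]).tail)).map
            (fun p => String.ofList (PySem.List.slice ds (some p.1) (some p.2))) := by
        simp only [altList, ← hF, ← hm]
        rw [if_neg (by omega)]
      have hzc := zip_tail_concat (0 :: F) (by simp) m
      have hg : (0 :: F).getLast (by simp) ∈ (0 : Int) :: F := List.getLast_mem _
      obtain ⟨hg0, hgm⟩ := hmemF _ hg
      have hstable : ∀ p ∈ ((0 :: F).zip (0 :: F).tail),
          String.ofList (PySem.List.slice (ds ++ [x]) (some p.1) (some p.2)) =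
            String.ofList (PySem.List.slice ds (some p.1) (some p.2)) := by
        intro p hp
        obtain ⟨hp1, hp2⟩ := mem_zip_tail hp
        obtain ⟨h1a, h1b⟩ := hmemF _ hp1
        obtain ⟨h2a, h2b⟩ := hmemF _ hp2
        rw [slice_stable ds x h1a h2a h1b h2b]
      have hsliceglast : PySem.List.slice (ds ++ [x]) (some ((0 :: F).getLast (by simp))) (some (m + 1)) =
          PySem.List.slice ds (some ((0 :: F).getLast (by simp))) (some m) ++ [x] :=
        slice_grow ds x hg0 hgm
      by_cases hb : bBound marks m = true
      · -- boundary at m: B gains the pair (m, m+1); A appends a fresh one-char token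
        have haltx : altList marks (ds ++ [x]) =
            ((((0 :: F) ++ [m]) ++ [m + 1]).zip ((((0 :: F) ++ [m]) ++ [m + 1]).tail)).map
              (fun p => String.ofList (PySem.List.slice (ds ++ [x]) (some p.1) (some p.2))) := by
          simp only [altList, hlen']
          rw [if_neg (by omega), hrange, List.filter_append]
          simp [hb, ← hF]
        have hlast : (((0 :: F) ++ [m]).getLast (by simp)) = m := by
          simp
        rw [haltx, zip_tail_concat ((0 :: F) ++ [m]) (by simp) (m + 1), hzc, hlast]
        have hsx : PySem.List.slice (ds ++ [x]) (some m) (some (m + 1)) = [x] := by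
          rw [PySem.List.slice_toNat _ (by omega) (by omega)]
          have h2 : (m + 1).toNat - m.toNat = 1 := by omega
          have h1 : m.toNat = ds.length := by omega
          rw [h2, h1, List.drop_left]
          rfl
        simp only [List.map_append, List.map_cons, List.map_nil, hsx]
        rw [List.map_congr_left (fun p hp => hstable p hp)]
        have hmid : String.ofList (PySem.List.slice (ds ++ [x])
            (some ((0 :: F).getLast (by simp))) (some m)) =
            String.ofList (PySem.List.slice ds (some ((0 :: F).getLast (by simp))) (some m)) := by
          rw [slice_stable ds x hg0 (by omega) hgm (by omega)]
        rw [hmid]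
        have hstepval : aStep marks (altList marks ds) (m, x) =
            altList marks ds ++ [String.ofList [x]] := by
          simp only [aStep]
          rw [if_neg (show ¬ ((m, x).1 = 0) by simp; omega)]
          have hb' : (PySem.List.pyGetD marks m false || PySem.List.pyGetD marks (m - 1) false) = true := hb
          rw [if_pos hb']
        rw [hstepval, halt, hzc]
        simp [List.map_append]
      · -- no boundary at m: B's last slice stretches to m+1; A extends its last token
        have hbf : bBound marks m = false := by simpa using hb
        have haltx : altList marks (ds ++ [x]) =
            (((0 :: F) ++ [m + 1]).zip (((0 :: F) ++ [m + 1]).tail)).map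
              (fun p => String.ofList (PySem.List.slice (ds ++ [x]) (some p.1) (some p.2))) := by
          simp only [altList, hlen']
          rw [if_neg (by omega), hrange, List.filter_append]
          simp [hbf, ← hF]
        rw [haltx, zip_tail_concat (0 :: F) (by simp) (m + 1)]
        simp only [List.map_append, List.map_cons, List.map_nil]
        rw [List.map_congr_left (fun p hp => hstable p hp), hsliceglast]
        have hpush : String.ofList (PySem.List.slice ds (some ((0 :: F).getLast (by simp))) (some m) ++ [x]) =
            (String.ofList (PySem.List.slice ds (some ((0 :: F).getLast (by simp))) (some m))).push x := by
          simp [String.ext_iff]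
        rw [hpush]
        have htok : altList marks ds =
            ((0 :: F).zip (0 :: F).tail).map
              (fun p => String.ofList (PySem.List.slice ds (some p.1) (some p.2))) ++
            [String.ofList (PySem.List.slice ds (some ((0 :: F).getLast (by simp))) (some m))] := by
          rw [halt, hzc]; simp
        simp only [aStep, if_neg (by omega : ¬ m = 0)]
        have hbB : (PySem.List.pyGetD marks m false || PySem.List.pyGetD marks (m - 1) false) = false := hbf
        rw [hbB]
        simp only [Bool.false_eq_true, if_false, htok]
        rw [List.dropLast_concat, getLast!_concat']

-- ===== VERDICT (by name: the statement is the Claim_ definition above) =====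
theorem split_marks_spec : Claim_equal_split_marks := by
  intro line marks _ _
  unfold Spec_split_marks split_marks split_marks_alt
  exact main_lemma marks line.toList
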